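-- pv_equiv track=rewrite | github.com/PreciousWarrior/random-stuff | codewars/strip.py | solution
-- ===== SOURCE A (Python) =====
-- def solution(string,markers):
--     lines = string.split("\n")
--     updated_lines = []
--     for line in lines:
--         lowest_ind = float('inf')
--         for marker in markers:
--             ind = line.find(marker)
--             if ind < lowest_ind and ind != -1: lowest_ind = ind
--         if lowest_ind != float('inf'):
--             # comment marker was found
--             updated_lines.append(line[0:lowest_ind].rstrip())
--         else:
--             updated_lines.append(line.rstrip())
--
--     return '\n'.join(updated_lines)
-- ===== SOURCE B (Python) =====
-- def solution(string, markers):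
--     out = []
--     for line in string.split("\n"):
--         cut = len(line)
--         for i in range(len(line) + 1):
--             if any(line[i:].startswith(m) for m in markers):
--                 cut = i
--                 break
--         out.append(line[:cut].rstrip())
--     return "\n".join(out)
-- ===== Notes on version B (the rewrite author's own statement) =====
-- stated objective: faster
-- what changed: Instead of computing each marker's first-occurrence index over the whole line with find() and taking the minimum via a float('inf') sentinel, B scans each line's positions left to right and cuts at the first position where any marker starts, so it stops at the cut instead of scanning every line to the end once per marker.
import Mathlib
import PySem

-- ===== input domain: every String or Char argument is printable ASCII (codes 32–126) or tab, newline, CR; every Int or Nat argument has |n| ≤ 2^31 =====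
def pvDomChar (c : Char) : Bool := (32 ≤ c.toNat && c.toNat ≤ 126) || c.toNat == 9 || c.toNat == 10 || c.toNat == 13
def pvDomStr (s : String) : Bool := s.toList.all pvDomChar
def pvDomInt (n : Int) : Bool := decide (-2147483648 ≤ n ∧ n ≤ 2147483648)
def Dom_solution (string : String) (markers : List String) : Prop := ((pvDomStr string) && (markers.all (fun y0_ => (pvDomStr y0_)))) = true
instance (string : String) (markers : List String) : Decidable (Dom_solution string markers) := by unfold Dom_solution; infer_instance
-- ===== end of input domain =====

-- B replaces A's per-marker find/min-with-infinity scan by a left-to-right positional scan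
-- that cuts each line at the first position where any marker starts (objective: alternative).


-- ===== PORT A =====
-- A's inner loop: smallest find-index over the markers, 'none' playing float('inf')
def pvLowest (line : String) (markers : List String) : Option Int :=
  markers.foldl (fun low marker =>
    let ind := PySem.Str.find line marker
    if (match low with | none => true | some l => decide (ind < l)) && (ind != -1)
    then some ind else low) none

def solution (string : String) (markers : List String) : String :=
  let lines := (PySem.Str.split? string "\n").getD []  -- sep "\n" ≠ "", so split? = some
  let updated_lines := lines.foldl (fun acc line =>
    acc ++ [match pvLowest line markers with
            | some i => PySem.Str.rstrip (PySem.Str.slice line (some 0) (some i))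
            | none => PySem.Str.rstrip line]) []
  PySem.Str.join "\n" updated_lines

-- ===== PORT B =====
-- B's inner loop: 'for i in range(len(line)+1): if any(line[i:].startswith(m) for m in markers): cut = i; break'
def pvFindCut (line : String) (markers : List String) : Nat → Nat → Nat
  | _, 0 => (PySem.Str.len line).toNat
  | i, r + 1 =>
    if markers.any (fun m => PySem.Str.startswith (PySem.Str.slice line (some (i : Int)) none) m)
    then i else pvFindCut line markers (i + 1) r

def solution_alt (string : String) (markers : List String) : String :=
  let out := ((PySem.Str.split? string "\n").getD []).foldl (fun acc line =>
    let cut := pvFindCut line markers 0 ((PySem.Str.len line).toNat + 1)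
    acc ++ [PySem.Str.rstrip (PySem.Str.slice line (some 0) (some (cut : Int)))]) []
  PySem.Str.join "\n" out

-- ===== PRECONDITION & SPEC =====
def Spec_solution (string : String) (markers : List String) (out : String) : Prop := out = solution_alt string markers
instance (string : String) (markers : List String) (out : String) : Decidable (Spec_solution string markers out) := by unfold Spec_solution; infer_instance

-- ===== CLAIM (what is proved, stated in full; the proofs are below) =====
def Claim_equal_solution : Prop := ∀ (string : String) (markers : List String), Dom_solution string markers → Spec_solution string markers (solution string markers)

-- ===== LEMMAS AND PROOFS =====

-- characterization of A's inner fold: the result comes from some marker's find, is a lower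
-- bound of every successful find, and is bounded by the incoming accumulator
lemma pvFold_spec (line : String) (ms : List String) : ∀ (low : Option Int),
    (let r := ms.foldl (fun low marker =>
        let ind := PySem.Str.find line marker
        if (match low with | none => true | some l => decide (ind < l)) && (ind != -1)
        then some ind else low) low
     (r = low ∨ ∃ m ∈ ms, PySem.Str.find line m ≠ -1 ∧ r = some (PySem.Str.find line m))
     ∧ (∀ m ∈ ms, PySem.Str.find line m ≠ -1 → ∃ v, r = some v ∧ v ≤ PySem.Str.find line m)
     ∧ (∀ w, low = some w → ∃ v, r = some v ∧ v ≤ w)) := by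
  induction ms with
  | nil => intro low; refine ⟨Or.inl rfl, by simp, ?_⟩; intro w hw; exact ⟨w, by simp [hw]⟩
  | cons m t ih =>
    intro low
    simp only [List.foldl_cons]
    by_cases hc : ((match low with | none => true | some l => decide ((PySem.Str.find line m) < l)) && ((PySem.Str.find line m) != -1)) = true
    · obtain ⟨ih1, ih2, ih3⟩ := ih (some (PySem.Str.find line m))
      simp only [if_pos hc]
      have hne : PySem.Str.find line m ≠ -1 := by
        simp only [Bool.and_eq_true, bne_iff_ne] at hc; exact hc.2
      refine ⟨?_, ?_, ?_⟩
      · rcases ih1 with h | ⟨m', hm', h1, h2⟩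
        · exact Or.inr ⟨m, List.mem_cons_self, hne, h⟩
        · exact Or.inr ⟨m', List.mem_cons_of_mem _ hm', h1, h2⟩
      · intro m' hm' hne'
        rcases List.mem_cons.1 hm' with rfl | hm'
        · exact ih3 _ rfl
        · exact ih2 m' hm' hne'
      · intro w hw
        have hlt : PySem.Str.find line m < w := by
          rw [hw] at hc
          simp only [Bool.and_eq_true, decide_eq_true_eq] at hc; exact hc.1
        obtain ⟨v, hv, hvle⟩ := ih3 _ rfl
        exact ⟨v, hv, le_of_lt (lt_of_le_of_lt hvle hlt)⟩
    · obtain ⟨ih1, ih2, ih3⟩ := ih low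
      simp only [if_neg hc]
      refine ⟨?_, ?_, ?_⟩
      · rcases ih1 with h | ⟨m', hm', h1, h2⟩
        · exact Or.inl h
        · exact Or.inr ⟨m', List.mem_cons_of_mem _ hm', h1, h2⟩
      · intro m' hm' hne'
        rcases List.mem_cons.1 hm' with rfl | hm'
        · obtain ⟨w, hlow⟩ : ∃ w, low = some w := by
            cases hlowc : low with
            | none =>
              exfalso; rw [hlowc] at hc
              simp only [Bool.true_and, bne_iff_ne] at hc
              exact hc (by simpa using hne')
            | some w => exact ⟨w, rfl⟩
          have hwle : w ≤ PySem.Str.find line m' := by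
            rw [hlow] at hc
            simp only [Bool.and_eq_true, decide_eq_true_eq, bne_iff_ne, not_and] at hc
            by_contra hlt
            exact hc (lt_of_not_ge hlt) hne'
          obtain ⟨v, hv, hvle⟩ := ih3 _ hlow
          exact ⟨v, hv, le_trans hvle hwle⟩
        · exact ih2 m' hm' hne'
      · exact ih3

-- a marker matching at position j means its find succeeds and points at or before j
lemma pvFind_pos_le (line m : String) (j : Nat) (h : m.toList <+: line.toList.drop j) :
    PySem.Str.find line m ≠ -1 ∧ (PySem.Str.find line m).toNat ≤ j := by
  have hin : PySem.Chars.isIn m.toList line.toList = true :=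
    (PySem.Chars.exists_prefix_drop_iff_isIn _ _).1 ⟨j, h⟩
  have hinf := (PySem.Chars.isIn_iff_infix _ _).1 hin
  have hnonneg : 0 ≤ PySem.Chars.find line.toList m.toList :=
    (PySem.Chars.find_nonneg_iff _ _).2 hinf
  have hspec := PySem.Chars.find_spec hnonneg
  refine ⟨by simp only [PySem.Str.find_eq]; omega, ?_⟩
  simp only [PySem.Str.find_eq]
  by_contra hj
  exact hspec.2 j (by omega) h

-- B's loop test at position i decides 'some marker matches at i'
lemma pvCond_iff (line : String) (ms : List String) (i : Nat) :
    (ms.any fun m => PySem.Str.startswith (PySem.Str.slice line (some (i : Int)) none) m) = true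
    ↔ ∃ m ∈ ms, m.toList <+: line.toList.drop i := by
  simp [List.any_eq_true, PySem.Str.startswith_eq, PySem.Str.toList_slice,
    PySem.Chars.slice_eq_listSlice, PySem.List.slice_from, PySem.Chars.startswith_iff]

-- B's scan stops exactly at the least matching position
lemma pvFindCut_found (line : String) (ms : List String) (v : Nat)
    (hP : ∃ m ∈ ms, m.toList <+: line.toList.drop v)
    (hmin : ∀ j < v, ¬ ∃ m ∈ ms, m.toList <+: line.toList.drop j) :
    ∀ (rem i : Nat), i ≤ v → v < i + rem → pvFindCut line ms i rem = v := by
  intro rem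
  induction rem with
  | zero => intro i h1 h2; omega
  | succ r ihr =>
    intro i h1 h2
    rcases Nat.eq_or_lt_of_le h1 with rfl | hlt
    · simp only [pvFindCut, if_pos ((pvCond_iff line ms i).2 hP)]
    · have hnc : ¬ (ms.any fun m => PySem.Str.startswith (PySem.Str.slice line (some (i : Int)) none) m) = true := by
        rw [pvCond_iff]; exact hmin i hlt
      simp only [pvFindCut, if_neg hnc]
      exact ihr (i + 1) hlt (by omega)

-- with no marker matching anywhere, B's scan runs off the end and keeps the full length
lemma pvFindCut_none (line : String) (ms : List String)
    (h : ∀ j : Nat, ¬ ∃ m ∈ ms, m.toList <+: line.toList.drop j) :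
    ∀ (rem i : Nat), pvFindCut line ms i rem = line.toList.length := by
  intro rem
  induction rem with
  | zero => intro i; simp [pvFindCut, PySem.Str.len_eq]
  | succ r ihr =>
    intro i
    have hnc : ¬ (ms.any fun m => PySem.Str.startswith (PySem.Str.slice line (some (i : Int)) none) m) = true := by
      rw [pvCond_iff]; exact h i
    simp only [pvFindCut, if_neg hnc]
    exact ihr (i + 1)

lemma pvSlice_full (line : String) :
    PySem.Str.slice line (some 0) (some ((line.toList.length : Nat) : Int)) = line := by
  apply String.toList_injective
  have : ((0:Int)) = ((0:Nat):Int) := by norm_num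
  rw [PySem.Str.toList_slice, PySem.Chars.slice_eq_listSlice, this, PySem.List.slice_natCast]
  simp

-- per-line agreement of the two programs
lemma pvLine_eq (line : String) (markers : List String) :
    (match pvLowest line markers with
     | some i => PySem.Str.rstrip (PySem.Str.slice line (some 0) (some i))
     | none => PySem.Str.rstrip line)
    = PySem.Str.rstrip (PySem.Str.slice line (some 0)
        (some ((pvFindCut line markers 0 ((PySem.Str.len line).toNat + 1) : Nat) : Int))) := by
  obtain ⟨s1, s2, s3⟩ := pvFold_spec line markers none
  cases hr : pvLowest line markers with
  | none =>
    have hall : ∀ j : Nat, ¬ ∃ m ∈ markers, m.toList <+: line.toList.drop j := by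
      rintro j ⟨m, hm, hpre⟩
      obtain ⟨hne, -⟩ := pvFind_pos_le line m j hpre
      obtain ⟨v, hv, -⟩ := s2 m hm hne
      rw [show (List.foldl _ none markers : Option Int) = pvLowest line markers from rfl, hr] at hv
      simp at hv
    rw [pvFindCut_none line markers hall _ 0, pvSlice_full]
  | some v =>
    have hr' : (List.foldl (fun low marker =>
        let ind := PySem.Str.find line marker
        if (match low with | none => true | some l => decide (ind < l)) && (ind != -1)
        then some ind else low) none markers : Option Int) = some v := hr
    rw [hr'] at s1 s2
    obtain ⟨m0, hm0, hne0, hv0⟩ : ∃ m ∈ markers, PySem.Str.find line m ≠ -1 ∧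
        (some v : Option Int) = some (PySem.Str.find line m) := by
      rcases s1 with h | h
      · exact absurd h (by simp)
      · exact h
    have hv0' : v = PySem.Str.find line m0 := Option.some.injEq _ _ ▸ (by simpa using hv0)
    have hnonneg : 0 ≤ v := by
      have := PySem.Chars.neg_one_le_find line.toList m0.toList
      rw [hv0', PySem.Str.find_eq]
      rw [PySem.Str.find_eq] at hne0
      omega
    have hP : ∃ m ∈ markers, m.toList <+: line.toList.drop v.toNat := by
      refine ⟨m0, hm0, ?_⟩
      have hnn : 0 ≤ PySem.Chars.find line.toList m0.toList := by
        rw [hv0', PySem.Str.find_eq] at hnonneg; exact hnonneg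
      have := (PySem.Chars.find_spec hnn).1
      rwa [hv0', PySem.Str.find_eq]
    have hlen : v ≤ (line.toList.length : Int) := by
      rw [hv0', PySem.Str.find_eq]; exact PySem.Chars.find_le_length _ _
    have hmin : ∀ j < v.toNat, ¬ ∃ m ∈ markers, m.toList <+: line.toList.drop j := by
      rintro j hj ⟨m, hm, hpre⟩
      obtain ⟨hne, hle⟩ := pvFind_pos_le line m j hpre
      obtain ⟨w, hw, hwle⟩ := s2 m hm hne
      have hwv : v = w := by simpa using hw
      have : 0 ≤ PySem.Str.find line m := by
        have := PySem.Chars.neg_one_le_find line.toList m.toList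
        rw [PySem.Str.find_eq] at hne ⊢; omega
      omega
    have hcut : pvFindCut line markers 0 ((PySem.Str.len line).toNat + 1) = v.toNat := by
      apply pvFindCut_found line markers v.toNat hP hmin
      · omega
      · simp only [PySem.Str.len_eq]; omega
    rw [hcut, Int.toNat_of_nonneg hnonneg]

-- ===== VERDICT (by name: the statement is the Claim_ definition above) =====
theorem solution_spec : Claim_equal_solution := by
  intro string markers _
  unfold Spec_solution
  have h : (fun (acc : List String) (line : String) =>
      acc ++ [match pvLowest line markers with
              | some i => PySem.Str.rstrip (PySem.Str.slice line (some 0) (some i))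
              | none => PySem.Str.rstrip line])
      = (fun (acc : List String) (line : String) =>
      let cut := pvFindCut line markers 0 ((PySem.Str.len line).toNat + 1)
      acc ++ [PySem.Str.rstrip (PySem.Str.slice line (some 0) (some (cut : Int)))]) := by
    funext acc line; rw [pvLine_eq]
  unfold solution solution_alt
  rw [h]
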